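-- pv_equiv track=rewrite | github.com/DilipSams/Trading | waverider_signal_bot.py | find_entry_date
-- ===== SOURCE A (Python) =====
-- def find_entry_date(uid: str, holdings_log: dict, rebalance_dates: list):
--     """Walk backwards to find when this UID first entered (continuous streak)."""
--     entry = None
--     for rd in reversed(rebalance_dates):
--         if uid in holdings_log.get(rd, []):
--             entry = rd
--         else:
--             break
--     return entry
-- ===== SOURCE B (Python) =====
-- def find_entry_date(uid: str, holdings_log: dict, rebalance_dates: list):
--     """Precompute a boolean presence list, count the length k of the trailing run of
--     True by walking an index from the back, and return the date k slots before the end."""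
--     present = [uid in holdings_log.get(rd, []) for rd in rebalance_dates]
--     k = 0
--     while k < len(present) and present[len(present) - 1 - k]:
--         k += 1
--     return rebalance_dates[len(rebalance_dates) - k] if k > 0 else None
-- ===== Notes on version B (the rewrite author's own statement) =====
-- stated objective: alternative
-- what changed: Replaces A's backward early-break walk that carries the candidate date with a staged computation: map dates to a boolean presence list, count the trailing run length k, and index rebalance_dates at len-k.
import Mathlib
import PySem

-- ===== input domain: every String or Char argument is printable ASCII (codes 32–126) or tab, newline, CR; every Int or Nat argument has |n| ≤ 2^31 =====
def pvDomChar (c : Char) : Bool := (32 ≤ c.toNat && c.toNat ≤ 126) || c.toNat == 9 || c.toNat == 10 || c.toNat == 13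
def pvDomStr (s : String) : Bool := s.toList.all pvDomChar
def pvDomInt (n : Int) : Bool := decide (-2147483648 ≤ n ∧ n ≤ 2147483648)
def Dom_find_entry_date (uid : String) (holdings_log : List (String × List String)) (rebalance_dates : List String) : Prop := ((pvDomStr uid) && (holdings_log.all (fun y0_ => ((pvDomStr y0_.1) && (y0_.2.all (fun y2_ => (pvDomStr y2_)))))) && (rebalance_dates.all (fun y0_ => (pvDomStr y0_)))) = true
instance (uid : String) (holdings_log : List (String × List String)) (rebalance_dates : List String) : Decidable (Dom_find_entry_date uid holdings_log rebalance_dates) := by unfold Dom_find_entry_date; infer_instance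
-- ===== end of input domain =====

-- B replaces A's backward early-break walk by a staged computation: a boolean presence list, a trailing-run count k, and an index at len-k (alternative decomposition, same cost).


-- ===== PORT A =====
-- A walks rebalance_dates backwards, recording each date holding uid, breaking at the first absence.
def pvLoopA (uid : String) (holdings_log : List (String × List String)) :
    List String → Option String → Option String
  | [], entry => entry
  | rd :: rest, entry =>
      if ((PySem.Dict.mk holdings_log).getD rd []).contains uid then
        pvLoopA uid holdings_log rest (some rd)
      else entry

def find_entry_date (uid : String) (holdings_log : List (String × List String)) (rebalance_dates : List String) : Option String :=
  pvLoopA uid holdings_log rebalance_dates.reverse none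

-- ===== PORT B =====
-- the while loop of Source B: it reads present[len-1-k] for k = 0,1,2,…, i.e. it consumes
-- the reversed presence list from the front, counting until the first False
def pvTrailCount : List Bool → Nat
  | [] => 0
  | b :: rest => if b then pvTrailCount rest + 1 else 0

def find_entry_date_alt (uid : String) (holdings_log : List (String × List String)) (rebalance_dates : List String) : Option String :=
  let present := rebalance_dates.map (fun rd => ((PySem.Dict.mk holdings_log).getD rd []).contains uid)
  let k := pvTrailCount present.reverse
  if 0 < k then PySem.List.pyGet? rebalance_dates ((rebalance_dates.length : Int) - (k : Int)) else none

-- ===== PRECONDITION & SPEC =====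
def Spec_find_entry_date (uid : String) (holdings_log : List (String × List String)) (rebalance_dates : List String) (out : Option String) : Prop := out = find_entry_date_alt uid holdings_log rebalance_dates
instance (uid : String) (holdings_log : List (String × List String)) (rebalance_dates : List String) (out : Option String) : Decidable (Spec_find_entry_date uid holdings_log rebalance_dates out) := by unfold Spec_find_entry_date; infer_instance

-- ===== CLAIM (what is proved, stated in full; the proofs are below) =====
def Claim_equal_find_entry_date : Prop := ∀ (uid : String) (holdings_log : List (String × List String)) (rebalance_dates : List String), Dom_find_entry_date uid holdings_log rebalance_dates → Spec_find_entry_date uid holdings_log rebalance_dates (find_entry_date uid holdings_log rebalance_dates)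

-- ===== LEMMAS AND PROOFS =====

-- the membership test both programs use, as a predicate
def pvMem (uid : String) (holdings_log : List (String × List String)) (rd : String) : Bool :=
  ((PySem.Dict.mk holdings_log).getD rd []).contains uid

-- A's backward loop returns the last element of the all-present prefix of its input,
-- falling back to the accumulator.
lemma loopA_eq (uid : String) (log : List (String × List String)) :
    ∀ (r : List String) (a : Option String),
      pvLoopA uid log r a =
        (match (r.takeWhile (pvMem uid log)).getLast? with
         | some y => some y
         | none => a) := by
  intro r
  induction r with
  | nil => intro a; simp [pvLoopA]
  | cons x rest ih =>
      intro a
      by_cases h : pvMem uid log x = true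
      · have hm : uid ∈ (PySem.Dict.mk log).getD x [] := by simpa [pvMem] using h
        simp only [pvLoopA, if_pos, List.takeWhile_cons, h, ih]
        cases hh : (rest.takeWhile (pvMem uid log)).getLast? with
        | none => simp only [List.getLast?_cons, hh]; simp [hm]
        | some y => simp only [List.getLast?_cons, hh]; simp [hm]
      · have hm : uid ∉ (PySem.Dict.mk log).getD x [] := by simpa [pvMem] using h
        simp [pvLoopA, hm, h]

-- the trailing-run count is the length of the leading all-true prefix
lemma trailCount_eq_takeWhile (l : List Bool) :
    pvTrailCount l = (l.takeWhile id).length := by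
  induction l with
  | nil => simp [pvTrailCount]
  | cons b rest ih =>
      cases b <;> simp [pvTrailCount, ih]

-- takeWhile commutes with map
lemma takeWhile_id_map (p : String → Bool) (l : List String) :
    ((l.map p).takeWhile id) = (l.takeWhile p).map p := by
  induction l with
  | nil => simp
  | cons x rest ih =>
      by_cases h : p x = true
      · simp [h, ih]
      · simp [h]

-- getLast? of a takeWhile-prefix, as an index into the original list
lemma getLast?_takeWhile_getElem? {α : Type} (p : α → Bool) (l : List α)
    (hpos : 0 < (l.takeWhile p).length) :
    (l.takeWhile p).getLast? = l[(l.takeWhile p).length - 1]? := by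
  have hpre : l.takeWhile p <+: l := List.takeWhile_prefix p
  have h1 := (List.prefix_iff_getElem?.mp hpre) ((l.takeWhile p).length - 1) (by omega)
  rw [List.getLast?_eq_getElem?, List.getElem?_eq_getElem (by omega), h1]

-- ===== VERDICT (by name: the statement is the Claim_ definition above) =====
theorem find_entry_date_spec : Claim_equal_find_entry_date := by
  intro uid log ds _
  unfold Spec_find_entry_date find_entry_date find_entry_date_alt
  rw [loopA_eq]
  have hmap : ds.map (fun rd => ((PySem.Dict.mk log).getD rd []).contains uid)
      = ds.map (pvMem uid log) := rfl
  simp only [hmap, ← List.map_reverse, trailCount_eq_takeWhile, takeWhile_id_map,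
    List.length_map]
  have hklen : (ds.reverse.takeWhile (pvMem uid log)).length ≤ ds.length := by
    have := List.IsPrefix.length_le (List.takeWhile_prefix (l := ds.reverse) (pvMem uid log))
    simpa using this
  set k := (ds.reverse.takeWhile (pvMem uid log)).length with hkdef
  by_cases hpos : 0 < k
  · have hlast : (ds.reverse.takeWhile (pvMem uid log)).getLast? = (ds.reverse)[k - 1]? :=
      getLast?_takeWhile_getElem? _ _ (by omega)
    have hrev : (ds.reverse)[k - 1]? = ds[ds.length - 1 - (k - 1)]? := by
      rw [List.getElem?_reverse (by omega)]
    have hidx : ds.length - 1 - (k - 1) = ds.length - k := by omega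
    have hget : PySem.List.pyGet? ds ((ds.length : Int) - (k : Int)) = ds[ds.length - k]? := by
      rw [show ((ds.length : Int) - (k : Int)) = ((ds.length - k : Nat) : Int) by omega]
      simp [PySem.List.pyGet?_natCast]
    rw [if_pos hpos, hget, hlast, hrev, hidx]
    cases h : ds[ds.length - k]? <;> simp
  · have hk0 : k = 0 := by omega
    have ht0 : ds.reverse.takeWhile (pvMem uid log) = [] :=
      List.eq_nil_of_length_eq_zero hk0
    rw [if_neg hpos]
    simp [ht0]
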